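-- pv_equiv track=rewrite | github.com/plqj/leetcode_problem_self | algorithm_learning/011_dpDigitTypeOneRepeated.py | dpDigitTypeOneConsecutive
-- ===== SOURCE A (Python) =====
-- from functools import cache
--
-- def dpDigitTypeOneConsecutive(n:int) -> int:
--     s=str(n)
--
--     @cache
--     def f(i:int,mask,isLimit:bool,isNum:bool) -> int:
--         # 递归出口
--         if i == len(s):return int(isNum) # 合法数字
--
--         res=0
--
--         if not isNum:
--             res=f(i+1,mask,False,False)
--
--         low=0 if isNum else 1 # 如果前面没有填数字，必须从 1 开始（因为不能有前导零）
--         up=int(s[i]) if isLimit else 9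
--
--         for d in range(low,up+1):
--             if mask >> d & 1 == 0: # mask里的第d个字符为零（d不在已经出现过的数字集合中
--                 res+=f(i+1,mask|(1<<d),isLimit and d==up,True)
--
--         return res
--
--     return n-f(0,0,True,False)
-- ===== SOURCE B (Python) =====
-- def dpDigitTypeOneConsecutive(n: int) -> int:
--     # combinatorial: count D = numbers in [1, n] with all-distinct digits, return n - D
--     if n == 0:
--         return 0
--     digs = [int(c) for c in str(n)]
--     L = len(digs)
--     distinct = 0
--     # all shorter lengths k: 9 choices for the lead, falling choices for the rest
--     for k in range(1, L):
--         p = 9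
--         for j in range(k - 1):
--             p *= 9 - j
--         distinct += p
--     # same length: walk the digits of n, prefix of n fixed so far (all distinct)
--     used = set()
--     for i, d in enumerate(digs):
--         lo = 1 if i == 0 else 0
--         for x in range(lo, d):
--             if x not in used:
--                 p = 1
--                 for j in range(L - i - 1):
--                     p *= 9 - i - j
--                 distinct += p
--         if d in used:
--             break
--         used.add(d)
--     else:
--         distinct += 1  # n itself has all-distinct digits
--     return n - distinct
-- ===== Notes on version B (the rewrite author's own statement) =====
-- stated objective: faster
-- what changed: Replaces A's memoised digit-DP recursion f(i, mask, isLimit, isNum) by a direct combinatorial count: sum closed falling-permutation products for every shorter length, then walk the digits of n once maintaining the set of used digits, adding a permutation product per smaller unused digit and breaking at the first repeat; returns n minus that distinct-digit count.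
import Mathlib
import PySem

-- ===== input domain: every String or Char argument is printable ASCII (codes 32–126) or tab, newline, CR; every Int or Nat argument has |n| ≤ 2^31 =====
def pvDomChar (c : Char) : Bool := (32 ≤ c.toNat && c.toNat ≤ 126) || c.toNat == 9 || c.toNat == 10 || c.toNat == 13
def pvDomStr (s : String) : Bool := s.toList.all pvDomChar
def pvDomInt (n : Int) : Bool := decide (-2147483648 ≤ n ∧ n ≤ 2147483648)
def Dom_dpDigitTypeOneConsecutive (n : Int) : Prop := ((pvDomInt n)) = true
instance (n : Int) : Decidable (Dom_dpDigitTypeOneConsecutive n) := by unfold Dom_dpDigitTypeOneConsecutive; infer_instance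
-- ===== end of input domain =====

-- B replaces A's memoised digit-DP recursion by a direct combinatorial count (closed permutation
-- products per position), same return value for every n ≥ 0; Pre_ excludes n < 0, where A raises
-- ValueError (int('-')).

-- ===== PORT A =====
-- int(s[i]) for a one-character slice; the `.getD 0` default is unreachable under Pre_ (the
-- characters of str(n) for n ≥ 0 are decimal digits, where int() succeeds).
def pvIntOfChar (c : Char) : Int := (PySem.Int.ofChars? [c]).getD 0

-- the cached inner function f(i, mask, isLimit, isNum); the cache only memoises a pure function,
-- so the port is the plain recursion.  i, mask, d are kept as Nat: Python's i counts 0..len(s),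
-- mask is a nonnegative bit set, and d ranges over digits (low..up with 0 ≤ low ≤ up ≤ 9 under
-- Pre_, so range(low, up+1) is List.range' low (up+1-low)).  The guard `s.length ≤ i` is
-- Python's `i == len(s)` (calls only reach i ≤ len(s)).
def pvFA (s : List Char) (i : Nat) (mask : Nat) (isLimit : Bool) (isNum : Bool) : Int :=
  if s.length ≤ i then (if isNum then 1 else 0)
  else
    let res : Int := if !isNum then pvFA s (i+1) mask false false else 0
    let low : Nat := if isNum then 0 else 1
    let up : Nat := if isLimit then (pvIntOfChar (s.getD i '0')).toNat else 9
    (List.range' low (up + 1 - low)).foldl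
      (fun r d =>
        if mask >>> d &&& 1 == 0 then
          r + pvFA s (i+1) (mask ||| (1 <<< d)) (isLimit && d == up) true
        else r) res
termination_by s.length - i
decreasing_by all_goals omega

def dpDigitTypeOneConsecutive (n : Int) : Int :=
  n - pvFA (PySem.Int.toChars n) 0 0 true false

-- ===== PORT B =====
-- the `for i, d in enumerate(digs): … break / else: …` walk of Source B, as recursion on the digit
-- list carrying the index i, the set of used digits and the running count.
def pvWalk (L : Nat) (digs : List Int) (i : Nat) (used : PySem.Set Int) (acc : Int) : Int :=
  match digs with
  | [] => acc + 1                      -- for-else: n itself has all-distinct digits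
  | d :: rest =>
    let acc := (PySem.List.pyRange (if i == 0 then 1 else 0) d 1).foldl
      (fun a x =>
        if !(PySem.Set.contains used x) then
          a + (List.range (L - i - 1)).foldl (fun p (j : Nat) => p * ((9 : Int) - (i : Int) - (j : Int))) 1
        else a) acc
    if PySem.Set.contains used d then acc   -- break: a repeated digit, nothing further counts
    else pvWalk L rest (i+1) (PySem.Set.add used d) acc

def dpDigitTypeOneConsecutive_alt (n : Int) : Int :=
  if n == 0 then 0
  else
    let digs : List Int := (PySem.Int.toChars n).map pvIntOfChar
    let L := digs.length
    let distinct : Int := (List.range' 1 (L - 1)).foldl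
      (fun acc (k : Nat) => acc + (List.range (k - 1)).foldl (fun p (j : Nat) => p * ((9 : Int) - (j : Int))) 9) 0
    n - pvWalk L digs 0 PySem.Set.empty distinct

-- ===== PRECONDITION & SPEC =====
-- Pre_ excludes exactly n < 0, where A raises ValueError: str(n) starts with '-' and int('-') fails.
def Pre_dpDigitTypeOneConsecutive (n : Int) : Prop := 0 ≤ n
instance (n : Int) : Decidable (Pre_dpDigitTypeOneConsecutive n) := by unfold Pre_dpDigitTypeOneConsecutive; infer_instance
def pvWitness_dpDigitTypeOneConsecutive : Int := 1024

def Spec_dpDigitTypeOneConsecutive (n : Int) (out : Int) : Prop := out = dpDigitTypeOneConsecutive_alt n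
instance (n : Int) (out : Int) : Decidable (Spec_dpDigitTypeOneConsecutive n out) := by unfold Spec_dpDigitTypeOneConsecutive; infer_instance

-- ===== CLAIM (what is proved, stated in full; the proofs are below) =====
def Claim_equal_dpDigitTypeOneConsecutive : Prop := ∀ (n : Int), Dom_dpDigitTypeOneConsecutive n → Pre_dpDigitTypeOneConsecutive n → Spec_dpDigitTypeOneConsecutive n (dpDigitTypeOneConsecutive n)

-- ===== LEMMAS AND PROOFS =====

-- falling factorial u·(u-1)⋯(u-r+1), in the head-recursive form A's DP produces
def permInt : Nat → Nat → Int
  | _, 0 => 1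
  | u, r+1 => u * permInt (u-1) r

-- number of digits 0..9 NOT in the mask
def pvCnt (mask : Nat) : Nat := (List.range 10).countP (fun d => mask >>> d &&& 1 == 0)

-- running total of the shorter-length counts: pvG r = Σ_{t<r} 9 · permInt 9 t
def pvG : Nat → Int
  | 0 => 0
  | r+1 => pvG r + 9 * permInt 9 r

def pvDigitChars : List Char := ['0','1','2','3','4','5','6','7','8','9']

set_option maxRecDepth 10000 in
set_option maxHeartbeats 1000000 in
lemma bit_facts : ∀ mask < 1024, ∀ d < 10, (mask >>> d &&& 1 == 0) = true →
    pvCnt (mask ||| 1 <<< d) = pvCnt mask - 1 ∧ 1 ≤ pvCnt mask ∧ mask ||| 1 <<< d < 1024 := by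
  decide

set_option maxRecDepth 100000 in
set_option maxHeartbeats 4000000 in
lemma bit_or_facts : ∀ mask < 1024, ∀ u < 10, ∀ j < 10,
    ((mask ||| 1 <<< u) >>> j &&& 1 == 0) = ((mask >>> j &&& 1 == 0) && !(j == u)) := by
  decide

lemma cnt_zero_or : ∀ d < 10, pvCnt (0 ||| 1 <<< d) = 9 := by decide

lemma foldl_ite_const {α : Type} {l : List α} {p : α → Bool} {F : α → Int} {C : Int}
    (h : ∀ d ∈ l, p d = true → F d = C) (a : Int) :
    l.foldl (fun r d => if p d then r + F d else r) a = a + (l.countP p) * C := by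
  induction l generalizing a with
  | nil => simp
  | cons x xs ih =>
    simp only [List.foldl_cons, List.countP_cons]
    by_cases hp : p x = true
    · rw [ih (fun d hd => h d (List.mem_cons_of_mem _ hd)), h x (List.mem_cons_self) hp]
      simp only [hp, if_true]
      push_cast
      ring
    · simp only [hp, Bool.false_eq_true, if_false]
      rw [ih (fun d hd => h d (List.mem_cons_of_mem _ hd))]
      simp

lemma foldl_mul {α : Type} (l : List α) (f : α → Int) (a : Int) :
    l.foldl (fun p j => p * f j) a = a * (l.map f).prod := by
  induction l generalizing a with
  | nil => simp
  | cons x xs ih => simp only [List.foldl_cons, List.map_cons, List.prod_cons, ih]; ring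

lemma foldl_add_const {α : Type} (l : List α) (C : Int) (a : Int) :
    l.foldl (fun r _ => r + C) a = a + l.length * C := by
  induction l generalizing a with
  | nil => simp
  | cons x xs ih =>
    simp only [List.foldl_cons, List.length_cons, ih]
    push_cast; ring

lemma permInt_eq_prod : ∀ (r u : Nat),
    ((List.range r).map (fun (t : Nat) => (u : Int) - (t : Int))).prod = permInt u r := by
  intro r
  induction r with
  | zero => intro u; rfl
  | succ r ih =>
    intro u
    rw [List.range_succ_eq_map, List.map_cons, List.prod_cons, List.map_map, permInt]
    cases u with
    | zero =>
      rw [show ((fun (t:Nat) => ((0:Nat) : Int) - (t:Int)) ∘ Nat.succ)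
            = (fun (t:Nat) => ((0:Nat):Int) - ((t+1 : Nat):Int)) from rfl]
      norm_num
    | succ v =>
      have h : ((fun (t:Nat) => ((v+1 : Nat) : Int) - (t:Int)) ∘ Nat.succ)
          = (fun (t : Nat) => (v : Int) - (t : Int)) := by
        funext t; simp only [Function.comp_apply]; push_cast; ring
      rw [h, ih v]
      push_cast; ring

-- f(i, mask, False, True): free fill of the remaining positions with unused digits
lemma fA_free : ∀ (k : Nat) (cs : List Char) (i : Nat) (mask : Nat), i ≤ cs.length →
    k = cs.length - i → mask < 1024 →
    pvFA cs i mask false true = permInt (pvCnt mask) (cs.length - i) := by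
  intro k
  induction k with
  | zero =>
    intro cs i mask hi hk hm
    rw [pvFA]
    have h1 : cs.length ≤ i := by omega
    have h0 : cs.length - i = 0 := by omega
    simp [h1, h0]
    rfl
  | succ k ih =>
    intro cs i mask hi hk hm
    rw [pvFA]
    have hlt : ¬ (cs.length ≤ i) := by omega
    rw [if_neg hlt]
    simp only [Bool.not_true, Bool.false_and, if_true, if_false, Bool.false_eq_true]
    have hrange : List.range' 0 (9 + 1 - 0) = List.range 10 := (@List.range_eq_range' 10).symm
    rw [hrange]
    rw [foldl_ite_const (C := permInt (pvCnt mask - 1) (cs.length - (i+1)))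
      (fun d hd hset => ?_)]
    · have hr : cs.length - i = (cs.length - (i+1)) + 1 := by omega
      rw [hr]
      show (0:Int) + _ = _
      rw [permInt]
      exact zero_add _
    · have hd10 : d < 10 := List.mem_range.mp hd
      obtain ⟨hcnt, hc1, hlt1024⟩ := bit_facts mask hm d hd10 hset
      rw [ih cs (i+1) _ (by omega) (by omega) hlt1024, hcnt]

-- f(i, 0, False, False): the leading-skip chain contributes all shorter lengths
lemma fA_skip : ∀ (k : Nat) (cs : List Char) (i : Nat), i ≤ cs.length → k = cs.length - i →
    pvFA cs i 0 false false = pvG (cs.length - i) := by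
  intro k
  induction k with
  | zero =>
    intro cs i hi hk
    rw [pvFA]
    have h1 : cs.length ≤ i := by omega
    have h0 : cs.length - i = 0 := by omega
    simp [h1, h0, pvG]
  | succ k ih =>
    intro cs i hi hk
    rw [pvFA]
    have hlt : ¬ (cs.length ≤ i) := by omega
    rw [if_neg hlt]
    simp only [Bool.not_false, Bool.false_and, if_true, if_false, Bool.false_eq_true]
    rw [foldl_ite_const (C := permInt 9 (cs.length - (i+1))) (fun d hd hset => ?_)]
    · have hall : List.countP (fun d => 0 >>> d &&& 1 == 0) (List.range' 1 (9 + 1 - 1)) = 9 := by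
        rw [List.countP_eq_length.mpr]
        · simp
        · intro a _; simp [Nat.zero_shiftRight]
      rw [hall, ih cs (i+1) (by omega) (by omega)]
      have hr : cs.length - i = (cs.length - (i+1)) + 1 := by omega
      rw [hr, pvG]
      ring
    · have hd10 : d < 10 := by
        have := List.mem_range'_1.mp hd
        omega
      rw [fA_free (cs.length - (i+1)) cs (i+1) _ (by omega) rfl
          ((bit_facts 0 (by omega) d hd10 (by simp [Nat.zero_shiftRight])).2.2),
        cnt_zero_or d hd10]

lemma char_val (c : Char) (hc : c ∈ pvDigitChars) :
    pvIntOfChar c = ((pvIntOfChar c).toNat : Int) ∧ (pvIntOfChar c).toNat < 10 := by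
  fin_cases hc <;> decide

lemma digitChar_mem (x : Nat) (h : x < 10) : Nat.digitChar x ∈ pvDigitChars := by
  interval_cases x <;> decide

lemma digitChar_pos (x : Nat) (h1 : 1 ≤ x) (h2 : x < 10) :
    1 ≤ (pvIntOfChar (Nat.digitChar x)).toNat := by
  interval_cases x <;> decide

lemma toDigitsCore_mem : ∀ (f n : Nat) (ds : List Char), (∀ c ∈ ds, c ∈ pvDigitChars) →
    ∀ c ∈ Nat.toDigitsCore 10 f n ds, c ∈ pvDigitChars := by
  intro f
  induction f with
  | zero => intro n ds hds; simpa [Nat.toDigitsCore] using hds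
  | succ f ih =>
    intro n ds hds c hc
    rw [Nat.toDigitsCore] at hc
    by_cases h0 : n / 10 = 0
    · rw [if_pos h0] at hc
      rcases List.mem_cons.mp hc with rfl | hc
      · exact digitChar_mem _ (Nat.mod_lt _ (by omega))
      · exact hds _ hc
    · rw [if_neg h0] at hc
      refine ih (n/10) _ ?_ c hc
      intro c' hc'
      rcases List.mem_cons.mp hc' with rfl | hc'
      · exact digitChar_mem _ (Nat.mod_lt _ (by omega))
      · exact hds _ hc'

lemma toDigitsCore_head : ∀ (f n : Nat) (ds : List Char), 0 < n → n < 10 ^ f →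
    ∃ c t, Nat.toDigitsCore 10 f n ds = c :: t ∧ 1 ≤ (pvIntOfChar c).toNat := by
  intro f
  induction f with
  | zero => intro n ds hn hf; omega
  | succ f ih =>
    intro n ds hn hf
    rw [Nat.toDigitsCore]
    by_cases h0 : n / 10 = 0
    · rw [if_pos h0]
      have hn10 : n < 10 := by omega
      refine ⟨_, _, rfl, ?_⟩
      rw [Nat.mod_eq_of_lt hn10]
      exact digitChar_pos n hn hn10
    · rw [if_neg h0]
      exact ih (n/10) _ (by omega) (by rw [pow_succ] at hf; omega)

lemma shorter_eq : ∀ M : Nat,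
    (List.range' 1 M).foldl
      (fun acc (k : Nat) => acc + (List.range (k - 1)).foldl (fun p (j : Nat) => p * ((9 : Int) - (j : Int))) 9) 0
      = pvG M := by
  intro M
  induction M with
  | zero => rfl
  | succ M ih =>
    rw [List.range'_concat, List.foldl_append, ih]
    simp only [List.foldl_cons, List.foldl_nil]
    rw [show 1 + 1 * M - 1 = M from by omega, foldl_mul,
      show (fun (j:Nat) => (9:Int) - (j:Int)) = (fun (t:Nat) => ((9:Nat):Int) - (t:Int)) from by funext t; norm_num,
      permInt_eq_prod, pvG]

lemma getD_append_cons (pre t : List Char) (c : Char) : (pre ++ c :: t).getD pre.length '0' = c := by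
  simp [List.getD_eq_getElem?_getD]

lemma walk_eq : ∀ (rest pre : List Char) (mask : Nat) (used : PySem.Set Int) (acc : Int),
    (∀ c ∈ rest, c ∈ pvDigitChars) →
    1 ≤ pre.length → mask < 1024 → pvCnt mask = 10 - pre.length → pre.length ≤ 10 →
    (∀ x : Int, (PySem.Set.contains used x = true) ↔
      (∃ j : Nat, j < 10 ∧ x = (j : Int) ∧ ¬((mask >>> j &&& 1 == 0) = true))) →
    pvWalk (pre ++ rest).length (rest.map pvIntOfChar) pre.length used acc
      = acc + pvFA (pre ++ rest) pre.length mask true true := by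
  intro rest
  induction rest with
  | nil =>
    intro pre mask used acc hmem hpre hm hcnt hp10 hused
    rw [pvFA]
    simp [pvWalk]
  | cons ch rest' ih =>
    intro pre mask used acc hmem hpre hm hcnt hp10 hused
    obtain ⟨hdc, hu10⟩ := char_val ch (hmem ch (List.mem_cons_self))
    set u := (pvIntOfChar ch).toNat with hu
    -- the digit-vs-bit dictionary between B's used set and A's mask
    have hcb : ∀ k : Nat, k < 10 → (PySem.Set.contains used (k:Int)) = !(mask >>> k &&& 1 == 0) := by
      intro k hk
      cases hbit : (mask >>> k &&& 1 == 0) with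
      | true =>
        simp only [Bool.not_true]
        cases hcon : PySem.Set.contains used (k:Int) with
        | true =>
          obtain ⟨j, hj, hx, hb⟩ := (hused _).mp hcon
          have hjk : j = k := by exact_mod_cast hx.symm
          subst hjk
          exact absurd hbit hb
        | false => rfl
      | false =>
        simp only [Bool.not_false]
        exact (hused _).mpr ⟨k, hk, rfl, by rw [hbit]; simp⟩
    -- unfold B one step
    rw [List.map_cons, pvWalk]
    have hne0 : (pre.length == 0) = false := beq_eq_false_iff_ne.mpr (by omega)
    rw [hne0]
    -- unfold A one step
    rw [pvFA]
    have hlt : ¬((pre ++ ch :: rest').length ≤ pre.length) := by simp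
    rw [if_neg hlt, getD_append_cons]
    simp only [Bool.not_true, Bool.false_eq_true, if_false, if_true, Bool.true_and, Nat.sub_zero]
    rw [← hu]
    have hLml : (pre ++ ch :: rest').length - pre.length - 1 = rest'.length := by simp
    rw [hLml, hdc]
    have hi9of : ∀ {k : Nat}, k < 10 → (mask >>> k &&& 1 == 0) = true → pre.length ≤ 9 := by
      intro k hk hset
      have := (bit_facts mask hm k hk hset).2.1
      omega
    have hfill : pre.length ≤ 9 →
        List.foldl (fun p (j : Nat) => p * ((9:Int) - (pre.length : Int) - (j : Int))) 1 (List.range rest'.length)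
          = permInt (9 - pre.length) rest'.length := by
      intro h9
      rw [foldl_mul,
        show (fun (j:Nat) => (9:Int) - (pre.length:Int) - (j:Int))
            = (fun (t:Nat) => ((9 - pre.length : Nat):Int) - (t:Int)) from by
          funext t; rw [Nat.cast_sub h9]; push_cast; ring,
        permInt_eq_prod, one_mul]
    -- B's conditional-sum loop
    have hBh : ∀ x ∈ PySem.List.pyRange 0 ((u:Int)) 1, (!(PySem.Set.contains used x)) = true →
        (fun _ : Int => List.foldl (fun p (j : Nat) => p * ((9:Int) - (pre.length : Int) - (j : Int))) 1 (List.range rest'.length)) x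
          = permInt (9 - pre.length) rest'.length := by
      intro x hx hpx
      have hxr := (PySem.List.mem_pyRange_one).mp hx
      have hxk : x = ((x.toNat : Nat) : Int) := by omega
      have hklt : x.toNat < u := by omega
      have hcon : PySem.Set.contains used x = false := by
        cases hcc : PySem.Set.contains used x
        · rfl
        · rw [hcc] at hpx; cases hpx
      have hset : (mask >>> x.toNat &&& 1 == 0) = true := by
        have hq := hcb x.toNat (by omega)
        rw [hxk] at hcon
        rw [hcon] at hq
        cases hb : (mask >>> x.toNat &&& 1 == 0)
        · rw [hb] at hq; cases hq
        · rfl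
      exact hfill (hi9of (by omega) hset)
    rw [foldl_ite_const hBh acc]
    -- A's loop: split off the last (limit) digit
    rw [List.range'_concat, List.foldl_append]
    have hAh : ∀ d ∈ List.range' 0 u, (mask >>> d &&& 1 == 0) = true →
        (fun d => pvFA (pre ++ ch :: rest') (pre.length+1) (mask ||| 1 <<< d) (d == u) true) d
          = permInt (9 - pre.length) rest'.length := by
      intro dd hdd hset
      have hddu : dd < u := by
        have := List.mem_range'_1.mp hdd
        omega
      have h9 := hi9of (show dd < 10 by omega) hset
      simp only
      rw [beq_eq_false_iff_ne.mpr (show dd ≠ u by omega)]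
      rw [fA_free rest'.length _ _ _ (by simp only [List.length_append, List.length_cons]; omega)
          (by simp only [List.length_append, List.length_cons]; omega)
          (bit_facts mask hm dd (by omega) hset).2.2,
        (bit_facts mask hm dd (by omega) hset).1, hcnt,
        show (pre ++ ch :: rest').length - (pre.length + 1) = rest'.length from by
          simp only [List.length_append, List.length_cons]; omega,
        show 10 - pre.length - 1 = 9 - pre.length from by omega]
    rw [foldl_ite_const hAh 0]
    -- the two conditional sums count the same digits
    have hcount : List.countP (fun d => !PySem.Set.contains used d) (PySem.List.pyRange 0 ((u:Int)) 1)
        = List.countP (fun d => mask >>> d &&& 1 == 0) (List.range' 0 u) := by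
      rw [PySem.List.pyRange_one]
      simp only [sub_zero, Int.toNat_natCast]
      rw [List.countP_map, show List.range' 0 u = List.range u from (@List.range_eq_range' u).symm]
      apply List.countP_congr
      intro k hk
      have hku : k < u := List.mem_range.mp hk
      simp only [Function.comp_apply, zero_add]
      rw [hcb k (by omega), Bool.not_not]
    rw [hcount]
    simp only [List.foldl_cons, List.foldl_nil, zero_add, one_mul]
    rw [hcb u hu10]
    cases hbit : (mask >>> u &&& 1 == 0) with
    | false =>
      simp only [Bool.not_false, if_true, Bool.false_eq_true, if_false]
    | true =>
      simp only [Bool.not_true, Bool.false_eq_true, if_false, if_true, beq_self_eq_true]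
      have h9 := hi9of hu10 hbit
      obtain ⟨hcnt1, hge1, hlt1024⟩ := bit_facts mask hm u hu10 hbit
      have hused' : ∀ x : Int, (PySem.Set.add used ((u : Nat) : Int)).contains x = true ↔
          ∃ j : Nat, j < 10 ∧ x = (j:Int) ∧ ¬(((mask ||| 1 <<< u) >>> j &&& 1 == 0) = true) := by
        intro x
        rw [PySem.Set.contains_iff, PySem.Set.mem_add]
        constructor
        · rintro (hx | rfl)
          · obtain ⟨j, hj, rfl, hb⟩ := (hused x).mp (by rwa [PySem.Set.contains_iff])
            refine ⟨j, hj, rfl, ?_⟩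
            rw [bit_or_facts mask hm u hu10 j hj, Bool.eq_false_iff.mpr hb]
            simp
          · refine ⟨u, hu10, rfl, ?_⟩
            rw [bit_or_facts mask hm u hu10 u hu10]
            simp
        · rintro ⟨j, hj, rfl, hb⟩
          rw [bit_or_facts mask hm u hu10 j hj] at hb
          by_cases hju : j = u
          · right; rw [hju]
          · left
            have hbf : (mask >>> j &&& 1 == 0) = false := by
              cases hq : (mask >>> j &&& 1 == 0)
              · rfl
              · exfalso; apply hb; rw [hq]; simp [hju]
            have := (hused _).mpr ⟨j, hj, rfl, by rw [hbf]; simp⟩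
            rwa [PySem.Set.contains_iff] at this
      have hIH := ih (pre ++ [ch]) (mask ||| 1 <<< u) (PySem.Set.add used ((u : Nat) : Int))
        (acc + ↑(List.countP (fun d => mask >>> d &&& 1 == 0) (List.range' 0 u)) * permInt (9 - pre.length) rest'.length)
        (fun c hc => hmem c (List.mem_cons_of_mem _ hc)) (by simp) hlt1024
        (by rw [hcnt1, hcnt]; simp only [List.length_append, List.length_cons, List.length_nil]; omega)
        (by simp only [List.length_append, List.length_cons, List.length_nil]; omega) hused'
      rw [show (pre ++ [ch]) ++ rest' = pre ++ ch :: rest' from by simp,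
        show (pre ++ [ch]).length = pre.length + 1 from by simp] at hIH
      rw [hIH]
      ring

-- ===== VERDICT (by name: the statement is the Claim_ definition above) =====
theorem dpDigitTypeOneConsecutive_spec : Claim_equal_dpDigitTypeOneConsecutive := by
  intro n _ hpre
  have hn0 : (0:Int) ≤ n := hpre
  unfold Spec_dpDigitTypeOneConsecutive dpDigitTypeOneConsecutive dpDigitTypeOneConsecutive_alt
  rcases eq_or_lt_of_le hn0 with h0 | hpos
  · -- n = 0: str(0) = "0"; f finds no valid number and B returns 0 directly
    subst h0
    have hA : pvFA (PySem.Int.toChars 0) 0 0 true false = 0 := by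
      have hc : PySem.Int.toChars 0 = ['0'] := by decide
      rw [hc, pvFA]
      norm_num
      rw [show (pvIntOfChar '0').toNat = 0 from by decide]
      rw [show List.range' 1 0 = ([] : List Nat) from rfl, List.foldl_nil, pvFA]
      norm_num
    rw [hA]
    norm_num
  · have hne : (n == 0) = false := by
      rw [beq_eq_false_iff_ne]
      omega
    rw [hne]
    simp only [Bool.false_eq_true, if_false]
    have hts : PySem.Int.toChars n = Nat.toDigits 10 n.toNat := by
      unfold PySem.Int.toChars
      rw [if_neg (by omega)]
    rw [hts]
    have hmpos : 0 < n.toNat := by omega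
    have hmlt : n.toNat < 10 ^ (n.toNat + 1) :=
      lt_of_lt_of_le (Nat.lt_pow_self (by norm_num))
        (Nat.pow_le_pow_right (by norm_num) (Nat.le_succ _))
    obtain ⟨c0, tl, hcs, hc0pos⟩ := toDigitsCore_head (n.toNat + 1) n.toNat [] hmpos hmlt
    have hmem : ∀ c ∈ Nat.toDigits 10 n.toNat, c ∈ pvDigitChars :=
      toDigitsCore_mem (n.toNat + 1) n.toNat [] (by simp)
    rw [show Nat.toDigits 10 n.toNat = Nat.toDigitsCore 10 (n.toNat + 1) n.toNat [] from rfl,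
      hcs] at hmem ⊢
    obtain ⟨hdc0, hu0lt⟩ := char_val c0 (hmem c0 List.mem_cons_self)
    set u0 := (pvIntOfChar c0).toNat with hu0
    simp only [List.length_map, List.length_cons, Nat.add_sub_cancel]
    rw [shorter_eq tl.length]
    -- unfold A at position 0 (isLimit, not yet isNum)
    rw [pvFA]
    rw [if_neg (by simp)]
    simp only [Bool.not_false, Bool.false_eq_true, if_true, if_false, List.getD_cons_zero,
      Bool.true_and, zero_add, ← hu0]
    rw [fA_skip tl.length _ 1 (by simp) (by simp)]
    simp only [List.length_cons, Nat.add_sub_cancel]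
    have hsplit : List.range' 1 u0 = List.range' 1 (u0 - 1) ++ [u0] := by
      conv_lhs => rw [show u0 = (u0 - 1) + 1 from by omega]
      rw [List.range'_concat, show 1 + 1 * (u0 - 1) = u0 from by omega]
    rw [hsplit, List.foldl_append]
    have hAh : ∀ d ∈ List.range' 1 (u0 - 1), (0 >>> d &&& 1 == 0) = true →
        (fun d => pvFA (c0 :: tl) 1 (0 ||| 1 <<< d) (d == u0) true) d = permInt 9 tl.length := by
      intro dd hdd _
      have hddu : 1 ≤ dd ∧ dd < u0 := by
        have := List.mem_range'_1.mp hdd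
        omega
      simp only
      rw [beq_eq_false_iff_ne.mpr (show dd ≠ u0 by omega),
        fA_free tl.length _ 1 _ (by simp) (by simp)
          ((bit_facts 0 (by omega) dd (by omega) (by simp [Nat.zero_shiftRight])).2.2),
        cnt_zero_or dd (by omega)]
      simp
    rw [foldl_ite_const hAh]
    rw [show List.countP (fun d => 0 >>> d &&& 1 == 0) (List.range' 1 (u0 - 1)) = u0 - 1 from by
      rw [List.countP_eq_length.mpr (fun a _ => by simp [Nat.zero_shiftRight])]; simp]
    simp only [List.foldl_cons, List.foldl_nil]
    rw [show (0 >>> u0 &&& 1 == 0) = true from by simp [Nat.zero_shiftRight],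
      if_pos rfl, beq_self_eq_true]
    -- unfold B's walk at position 0
    rw [List.map_cons, pvWalk, hdc0]
    have hce : ∀ x : Int, PySem.Set.contains PySem.Set.empty x = false := by
      intro x
      cases hq : PySem.Set.contains PySem.Set.empty x
      · rfl
      · exact absurd ((PySem.Set.contains_iff _ _).mp hq) List.not_mem_nil
    simp only [hce, Bool.not_false, if_true, Bool.false_eq_true, if_false, beq_self_eq_true,
      zero_add, Nat.sub_zero, Nat.add_sub_cancel, Nat.cast_zero, sub_zero]
    rw [show PySem.Set.empty.add ((u0:Nat):Int) = [((u0:Nat):Int)] from by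
      show PySem.Set.add [] _ = _
      rw [PySem.Set.add_of_not_mem List.not_mem_nil]; rfl]
    rw [foldl_add_const, PySem.List.length_pyRange_one,
      show ((u0:Int) - 1).toNat = u0 - 1 from by omega, foldl_mul,
      show (fun (j:Nat) => (9:Int) - (j:Int)) = (fun (t:Nat) => ((9:Nat):Int) - (t:Int)) from by
        funext t; norm_num,
      permInt_eq_prod, one_mul]
    have hused1 : ∀ x : Int, PySem.Set.contains [((u0:Nat):Int)] x = true ↔
        ∃ j : Nat, j < 10 ∧ x = (j:Int) ∧ ¬(((0 ||| 1 <<< u0) >>> j &&& 1 == 0) = true) := by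
      intro x
      rw [PySem.Set.contains_iff]
      constructor
      · intro hx
        rcases List.mem_singleton.mp hx with rfl
        exact ⟨u0, hu0lt, rfl, by rw [bit_or_facts 0 (by omega) u0 hu0lt u0 hu0lt]; simp⟩
      · rintro ⟨j, hj, rfl, hb⟩
        rw [bit_or_facts 0 (by omega) u0 hu0lt j hj] at hb
        have hju : j = u0 := by
          by_contra hne2
          apply hb
          simp [Nat.zero_shiftRight, hne2]
        rw [hju]
        exact List.mem_singleton.mpr rfl
    have hW := walk_eq tl [c0] (0 ||| 1 <<< u0) [((u0:Nat):Int)]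
      (pvG tl.length + ↑(u0 - 1) * permInt 9 tl.length)
      (fun c hc => hmem c (List.mem_cons_of_mem _ hc)) (by simp)
      ((bit_facts 0 (by omega) u0 (by omega) (by simp [Nat.zero_shiftRight])).2.2)
      (by rw [cnt_zero_or u0 hu0lt]; simp) (by simp) hused1
    simp only [List.singleton_append, List.length_cons, List.length_nil, Nat.zero_add] at hW
    rw [hW]
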